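-- pv_equiv track=rewrite | github.com/LthreeC/X-scraper | common/utils.py | split_list_per_user
-- ===== SOURCE A (Python) =====
-- def split_list_per_user(task_list, users):
--     num_ids = len(task_list)
--     base_size = num_ids // users
--     remainder = num_ids % users
--     split_id_lists = []
--     start_index = 0
--     for i in range(users):
--         sub_size = base_size + 1 if i < remainder else base_size
--         if start_index + sub_size > num_ids:
--             split_id_lists.append([])
--         else:
--             split_id_lists.append(task_list[start_index:start_index + sub_size])
--         start_index += sub_size
--     return split_id_lists
-- ===== SOURCE B (Python) =====
-- def split_list_per_user(task_list, users):
--     base, rem = divmod(len(task_list), users)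
--     return [task_list[i * base + min(i, rem): (i + 1) * base + min(i + 1, rem)]
--             for i in range(users)]
-- ===== Notes on version B (the rewrite author's own statement) =====
-- stated objective: simpler
-- what changed: Replaced A's running start_index accumulator and dead overflow guard with closed-form slice boundaries i*base+min(i,rem) computed independently per chunk in a stateless list comprehension.
import Mathlib
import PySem

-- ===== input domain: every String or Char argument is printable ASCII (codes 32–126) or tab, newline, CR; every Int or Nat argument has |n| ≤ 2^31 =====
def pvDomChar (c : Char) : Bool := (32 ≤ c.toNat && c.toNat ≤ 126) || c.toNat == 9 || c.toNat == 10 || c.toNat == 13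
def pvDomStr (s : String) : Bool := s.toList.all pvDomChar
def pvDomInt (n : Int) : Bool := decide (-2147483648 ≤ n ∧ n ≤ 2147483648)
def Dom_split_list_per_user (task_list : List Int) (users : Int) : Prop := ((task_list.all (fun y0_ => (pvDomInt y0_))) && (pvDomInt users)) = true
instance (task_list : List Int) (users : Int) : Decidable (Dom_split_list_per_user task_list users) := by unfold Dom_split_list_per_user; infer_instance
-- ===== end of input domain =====

-- B replaces A's running start_index accumulator with closed-form slice boundaries
-- i*base + min(i, rem), building the result as a stateless comprehension (objective: simpler).

-- ===== PORT A =====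
def split_list_per_user (task_list : List Int) (users : Int) : List (List Int) :=
  let num_ids : Int := task_list.length
  let base_size : Int := PySem.Int.floordiv num_ids users
  let remainder : Int := PySem.Int.mod num_ids users
  let st :=
    (PySem.List.pyRange 0 users 1).foldl
      (fun (st : List (List Int) × Int) i =>
        let sub_size : Int := if i < remainder then base_size + 1 else base_size
        let acc :=
          if st.2 + sub_size > num_ids then st.1 ++ [[]]
          else st.1 ++ [PySem.List.slice task_list (some st.2) (some (st.2 + sub_size))]
        (acc, st.2 + sub_size))
      ([], 0)
  st.1

-- ===== PORT B =====
def split_list_per_user_alt (task_list : List Int) (users : Int) : List (List Int) :=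
  let n : Int := task_list.length
  let base : Int := PySem.Int.floordiv n users
  let rem : Int := PySem.Int.mod n users
  (PySem.List.pyRange 0 users 1).map (fun i =>
    PySem.List.slice task_list (some (i * base + min i rem))
      (some ((i + 1) * base + min (i + 1) rem)))

-- ===== PRECONDITION & SPEC =====
-- Pre_ excludes users = 0, on which Python A raises ZeroDivisionError (B raises too).
def Pre_split_list_per_user (task_list : List Int) (users : Int) : Prop := users ≠ 0
instance (task_list : List Int) (users : Int) : Decidable (Pre_split_list_per_user task_list users) := by unfold Pre_split_list_per_user; infer_instance
def pvWitness_split_list_per_user : List Int × Int := ([1, 2, 3, 4, 5], 2)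

def Spec_split_list_per_user (task_list : List Int) (users : Int) (out : List (List Int)) : Prop := out = split_list_per_user_alt task_list users
instance (task_list : List Int) (users : Int) (out : List (List Int)) : Decidable (Spec_split_list_per_user task_list users out) := by unfold Spec_split_list_per_user; infer_instance

-- ===== CLAIM (what is proved, stated in full; the proofs are below) =====
def Claim_equal_split_list_per_user : Prop := ∀ (task_list : List Int) (users : Int), Dom_split_list_per_user task_list users → Pre_split_list_per_user task_list users → Spec_split_list_per_user task_list users (split_list_per_user task_list users)

-- ===== LEMMAS AND PROOFS =====

-- Invariant of A's fold over the first j indices (stated for abstract base/rem with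
-- the divmod facts as hypotheses): the accumulator is exactly B's first j slices,
-- and start_index has the closed form j*base + min j rem.
theorem split_foldl_invariant (task_list : List Int) (users base rem : Int)
    (hsum : base * users + rem = (task_list.length : Int))
    (hbase0 : 0 ≤ base) (hrem0 : 0 ≤ rem)
    (j : Nat) (hj : (j : Int) ≤ users) :
    (List.range j).foldl
      (fun (st : List (List Int) × Int) (k : Nat) =>
        let i : Int := (k : Int)
        let sub_size : Int := if i < rem then base + 1 else base
        let acc :=
          if st.2 + sub_size > (task_list.length : Int) then st.1 ++ [[]]
          else st.1 ++ [PySem.List.slice task_list (some st.2) (some (st.2 + sub_size))]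
        (acc, st.2 + sub_size))
      ([], 0)
    = ((List.range j).map (fun (k : Nat) =>
        PySem.List.slice task_list (some ((k : Int) * base + min (k : Int) rem))
          (some (((k : Int) + 1) * base + min ((k : Int) + 1) rem))),
       (j : Int) * base + min (j : Int) rem) := by
  induction j with
  | zero => simp [hrem0]
  | succ j ih =>
    have hj' : (j : Int) ≤ users := by push_cast at hj ⊢; omega
    have hjlt : (j : Int) < users := by push_cast at hj; omega
    rw [List.range_succ, List.foldl_append, List.map_append, ih hj']
    simp only [List.foldl_cons, List.foldl_nil, List.map_cons, List.map_nil]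
    have hstep : (j : Int) * base + min (j : Int) rem +
        (if (j : Int) < rem then base + 1 else base)
        = ((j : Int) + 1) * base + min ((j : Int) + 1) rem := by
      have h1 : ((j : Int) + 1) * base = (j : Int) * base + base := by ring
      rw [h1]
      by_cases h : (j : Int) < rem
      · rw [if_pos h, min_eq_left (by omega), min_eq_left (by omega)]; ring
      · rw [if_neg h, min_eq_right (by omega), min_eq_right (by omega)]; ring
    have hguard : ¬ ((j : Int) * base + min (j : Int) rem +
        (if (j : Int) < rem then base + 1 else base) > (task_list.length : Int)) := by
      rw [hstep]
      have h1 : ((j : Int) + 1) * base ≤ users * base :=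
        mul_le_mul_of_nonneg_right (by omega) hbase0
      have h2 : min ((j : Int) + 1) rem ≤ rem := min_le_right _ _
      have h3 : users * base = base * users := by ring
      omega
    refine Prod.ext ?_ ?_
    · simp only []
      rw [if_neg (by simpa using hguard), hstep]
    · simp only []
      rw [hstep]
      push_cast
      ring_nf

theorem split_list_per_user_eq (task_list : List Int) (users : Int) (hu : users ≠ 0) :
    split_list_per_user task_list users = split_list_per_user_alt task_list users := by
  unfold split_list_per_user split_list_per_user_alt
  rcases lt_or_gt_of_ne hu with h | h
  · have hr : PySem.List.pyRange 0 users 1 = [] := by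
      rw [PySem.List.pyRange_one]
      have h0 : (users - 0).toNat = 0 := by omega
      rw [h0]; simp
    simp [hr]
  · rw [PySem.List.pyRange_one]
    simp only [List.foldl_map, List.map_map]
    have hsum := PySem.Int.floordiv_mul_add_mod (task_list.length : Int) users
    have hrem0 := PySem.Int.mod_nonneg (task_list.length : Int) h
    have hbase0 : 0 ≤ PySem.Int.floordiv (task_list.length : Int) users := by
      rw [PySem.Int.floordiv_eq_ediv_of_pos h]
      exact Int.ediv_nonneg (by simp) (le_of_lt h)
    have hinv := split_foldl_invariant task_list users
      (PySem.Int.floordiv (task_list.length : Int) users)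
      (PySem.Int.mod (task_list.length : Int) users)
      hsum hbase0 hrem0 users.toNat (by omega)
    simp only [sub_zero, zero_add, Function.comp_def] at hinv ⊢
    rw [hinv]

-- ===== VERDICT (by name: the statement is the Claim_ definition above) =====
theorem split_list_per_user_spec : Claim_equal_split_list_per_user := by
  intro task_list users _ hpre
  exact split_list_per_user_eq task_list users hpre
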